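-- pv_equiv track=rewrite | github.com/selfreferencing/erdos-86-lean | python/ed2_delta_coverage.py | divisors_of_square
-- ===== SOURCE A (Python) =====
-- def divisors_of_square(fac: dict):
--     """
--     Given factorization of A: fac[p]=e, build list of divisors of A^2.
--     A^2 has exponents 2e, so divisor count is prod(2e+1).
--     """
--     divs = [1]
--     for p, e in fac.items():
--         maxe = 2 * e
--         new = []
--         pe = 1
--         for _k in range(maxe + 1):
--             for d in divs:
--                 new.append(d * pe)
--             pe *= p
--         divs = new
--     return divs
-- ===== SOURCE B (Python) =====
-- def divisors_of_square(fac: dict):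
--     """Divisors of A^2 enumerated by mixed-radix index: precompute each prime's
--     power list [p**k for k in range(2e+1)]; the i-th divisor is the product of
--     the powers picked by the digits of i in the mixed radix of the list lengths
--     (first prime's digit is the least significant)."""
--     pow_lists = [[p ** k for k in range(2 * e + 1)] for p, e in fac.items()]
--     total = 1
--     for ps in pow_lists:
--         total *= len(ps)
--     divs = []
--     for idx in range(total):
--         d = 1
--         for ps in pow_lists:
--             d *= ps[idx % len(ps)]
--             idx //= len(ps)
--         divs.append(d)
--     return divs
-- ===== Notes on version B (the rewrite author's own statement) =====
-- stated objective: alternative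
-- what changed: Replaces A's iterative fold that rebuilds the whole divisor list once per prime (with a running power accumulator) by a direct mixed-radix enumeration: precompute each prime's power list, then compute the i-th divisor from the digits of i in the radix of the list lengths.
import Mathlib
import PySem

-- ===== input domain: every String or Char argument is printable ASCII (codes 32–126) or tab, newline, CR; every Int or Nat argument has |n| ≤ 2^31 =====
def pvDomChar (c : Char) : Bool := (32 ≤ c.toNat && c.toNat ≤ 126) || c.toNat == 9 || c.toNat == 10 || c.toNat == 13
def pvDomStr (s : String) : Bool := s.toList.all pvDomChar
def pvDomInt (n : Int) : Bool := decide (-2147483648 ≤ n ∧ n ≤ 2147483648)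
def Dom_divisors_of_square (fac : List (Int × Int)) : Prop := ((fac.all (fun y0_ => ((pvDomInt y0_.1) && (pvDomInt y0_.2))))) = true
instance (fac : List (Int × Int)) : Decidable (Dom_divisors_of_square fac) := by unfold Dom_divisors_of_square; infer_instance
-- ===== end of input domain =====

-- B enumerates the divisors by mixed-radix index over precomputed power lists instead of A's iterative per-prime refold with a running power accumulator; same output, different algorithm.


-- ===== PORT A =====
-- literal transliteration: for each (p, e), inner loop over range(2*e+1) carrying (new, pe)
def divisors_of_square (fac : List (Int × Int)) : List Int :=
  fac.foldl (fun divs pe_ =>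
    let p := pe_.1
    let e := pe_.2
    let maxe := 2 * e
    ((PySem.List.pyRange 0 (maxe + 1) 1).foldl
        (fun st _k => (st.1 ++ divs.map (fun d => d * st.2), st.2 * p))
        (([] : List Int), (1 : Int))).1) [1]

-- ===== PORT B =====
-- one prime's power list [p ** k for k in range(2*e+1)]  (k drawn from the range is nonnegative, so p ^ k.toNat is exact)
def altPowList (p e : Int) : List Int :=
  (PySem.List.pyRange 0 (2 * e + 1) 1).map (fun k => p ^ k.toNat)

-- pow_lists, total, then for idx in range(total): d = 1; for ps: d *= ps[idx % len(ps)]; idx //= len(ps)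
-- (ps[idx % len(ps)] is ported as pyGetD _ 0: the loop body only runs when every list is nonempty, so the index is always in range and the default is never used)
def divisors_of_square_alt (fac : List (Int × Int)) : List Int :=
  let powLists := fac.map (fun pe => altPowList pe.1 pe.2)
  let total := powLists.foldl (fun t ps => t * (ps.length : Int)) 1
  (PySem.List.pyRange 0 total 1).map (fun idx =>
    (powLists.foldl
        (fun st ps =>
          (st.1 * PySem.List.pyGetD ps (PySem.Int.mod st.2 (ps.length : Int)) 0,
           PySem.Int.floordiv st.2 (ps.length : Int)))
        ((1 : Int), idx)).1)

-- ===== PRECONDITION & SPEC =====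
def Spec_divisors_of_square (fac : List (Int × Int)) (out : List Int) : Prop := out = divisors_of_square_alt fac
instance (fac : List (Int × Int)) (out : List Int) : Decidable (Spec_divisors_of_square fac out) := by unfold Spec_divisors_of_square; infer_instance

-- ===== CLAIM (what is proved, stated in full; the proofs are below) =====
def Claim_equal_divisors_of_square : Prop := ∀ (fac : List (Int × Int)), Dom_divisors_of_square fac → Spec_divisors_of_square fac (divisors_of_square fac)

-- ===== LEMMAS AND PROOFS =====

-- proof-side middle form: divisors built by recursion on the list of power lists (first list varies fastest)
def pvRec : List (List Int) → List Int
  | [] => [1]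
  | ps :: rest => (pvRec rest).flatMap (fun w => ps.map (fun q => q * w))

-- A's inner loop, generalized over the carried state; only the length of the fold list matters
theorem divisors_inner (divs : List Int) (p : Int) (l : List Int) :
    ∀ (acc : List Int) (pe : Int),
      l.foldl (fun st (_k : Int) => (st.1 ++ divs.map (fun d => d * st.2), st.2 * p)) (acc, pe)
        = (acc ++ (List.range l.length).flatMap (fun k => divs.map (fun d => d * (pe * p ^ k))),
           pe * p ^ l.length) := by
  induction l with
  | nil => simp
  | cons x t ih =>
      intro acc pe
      simp only [List.foldl_cons, ih, List.length_cons, Prod.mk.injEq]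
      refine ⟨?_, by ring⟩
      simp only [List.range_succ_eq_map, List.flatMap_cons, List.flatMap_map, pow_zero,
        mul_one, List.append_assoc]
      congr 2
      congr 1
      funext k
      congr 1
      funext d
      simp only [pow_succ]
      ring

-- A's per-prime step combines the closed-form power list with the previous divisors
theorem divisors_step (divs : List Int) (p e : Int) :
    ((PySem.List.pyRange 0 (2 * e + 1) 1).foldl
        (fun st (_k : Int) => (st.1 ++ divs.map (fun d => d * st.2), st.2 * p))
        (([] : List Int), (1 : Int))).1
      = (altPowList p e).flatMap (fun q => divs.map (fun d => d * q)) := by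
  rw [divisors_inner]
  simp [altPowList, PySem.List.pyRange_one, List.flatMap_map]

-- A's fold from any seed is pvRec of the power lists, pointwise-multiplied into the seed
theorem divisors_fold (fac : List (Int × Int)) :
    ∀ (divs : List Int),
      fac.foldl (fun divs pe_ =>
          ((PySem.List.pyRange 0 (2 * pe_.2 + 1) 1).foldl
              (fun st (_k : Int) => (st.1 ++ divs.map (fun d => d * st.2), st.2 * pe_.1))
              (([] : List Int), (1 : Int))).1) divs
        = (pvRec (fac.map (fun pe => altPowList pe.1 pe.2))).flatMap (fun w => divs.map (fun d => d * w)) := by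
  induction fac with
  | nil => intro divs; simp [pvRec]
  | cons pe_ rest ih =>
      intro divs
      obtain ⟨p, e⟩ := pe_
      rw [List.foldl_cons, ih, divisors_step]
      simp only [List.map_cons, pvRec, List.map_flatMap, List.map_map,
        List.flatMap_assoc, List.flatMap_map]
      congr 1
      funext w
      congr 1
      funext q
      simp

-- B's total accumulator is the product of the lengths
theorem alt_total (ls : List (List Int)) :
    ∀ (c : Int), ls.foldl (fun t ps => t * (ps.length : Int)) c = c * ((ls.map List.length).prod : Int) := by
  induction ls with
  | nil => intro c; simp
  | cons ps rest ih =>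
      intro c
      rw [List.foldl_cons, ih, List.map_cons, List.prod_cons, Nat.cast_mul]
      ring

-- B's decode loop, generalized over the divisor accumulator
theorem alt_decode_mul (ls : List (List Int)) :
    ∀ (c idx : Int),
      (ls.foldl
          (fun st ps =>
            (st.1 * PySem.List.pyGetD ps (PySem.Int.mod st.2 (ps.length : Int)) 0,
             PySem.Int.floordiv st.2 (ps.length : Int)))
          (c, idx)).1
        = c * (ls.foldl
            (fun st ps =>
              (st.1 * PySem.List.pyGetD ps (PySem.Int.mod st.2 (ps.length : Int)) 0,
               PySem.Int.floordiv st.2 (ps.length : Int)))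
            (1, idx)).1 := by
  induction ls with
  | nil => intro c idx; simp
  | cons ps rest ih =>
      intro c idx
      simp only [List.foldl_cons]
      rw [ih, ih (1 * _)]
      ring

-- a range of a product, grouped as digits: slow digit j, fast digit i
theorem range_mul_flatMap (l0 T : Nat) :
    List.range (T * l0) = (List.range T).flatMap (fun j => (List.range l0).map (fun i => j * l0 + i)) := by
  induction T with
  | zero => simp
  | succ T ih =>
      rw [Nat.succ_mul, List.range_add, ih, List.range_succ, List.flatMap_append]
      simp [Nat.add_comm]

-- mixed-radix enumeration over the power lists equals pvRec
theorem alt_enum (ls : List (List Int)) :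
    (List.range (ls.map List.length).prod).map (fun (n : Nat) =>
        (ls.foldl
            (fun st ps =>
              (st.1 * PySem.List.pyGetD ps (PySem.Int.mod st.2 (ps.length : Int)) 0,
               PySem.Int.floordiv st.2 (ps.length : Int)))
            (1, (n : Int))).1)
      = pvRec ls := by
  induction ls with
  | nil => simp [pvRec]
  | cons ps rest ih =>
      rw [pvRec, ← ih, List.map_cons, List.prod_cons, Nat.mul_comm ps.length,
        range_mul_flatMap, List.map_flatMap, List.flatMap_map]
      congr 1
      funext j
      rw [List.map_map]
      refine List.ext_getElem (by simp) ?_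
      intro i h1 h2
      have hi : i < ps.length := by simpa using h1
      simp only [List.getElem_map, List.getElem_range, Function.comp_apply, List.foldl_cons]
      have hmod : PySem.Int.mod ((j * ps.length + i : Nat) : Int) (ps.length : Int) = (i : Int) := by
        rw [PySem.Int.mod_natCast, Nat.mul_comm j, Nat.mul_add_mod, Nat.mod_eq_of_lt hi]
      have hdiv : PySem.Int.floordiv ((j * ps.length + i : Nat) : Int) (ps.length : Int) = (j : Int) := by
        rw [PySem.Int.floordiv_natCast, Nat.mul_comm j, Nat.mul_add_div (by omega),
          Nat.div_eq_of_lt hi, Nat.add_zero]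
      rw [hmod, hdiv, alt_decode_mul, PySem.List.pyGetD_natCast,
        List.getD_eq_getElem _ _ hi, one_mul, mul_comm]

theorem divisors_of_square_spec : Claim_equal_divisors_of_square := by
  intro fac _
  unfold Spec_divisors_of_square divisors_of_square divisors_of_square_alt
  rw [divisors_fold]
  dsimp only
  rw [alt_total _ 1, one_mul]
  rw [PySem.List.pyRange_one]
  simp only [sub_zero, Int.toNat_natCast, List.map_map]
  rw [show ((fun idx =>
        ((fac.map fun pe => altPowList pe.1 pe.2).foldl
            (fun st ps =>
              (st.1 * PySem.List.pyGetD ps (PySem.Int.mod st.2 (ps.length : Int)) 0,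
               PySem.Int.floordiv st.2 (ps.length : Int)))
            (1, idx)).1) ∘ (fun k : Nat => (0 : Int) + k))
      = (fun n : Nat =>
        ((fac.map fun pe => altPowList pe.1 pe.2).foldl
            (fun st ps =>
              (st.1 * PySem.List.pyGetD ps (PySem.Int.mod st.2 (ps.length : Int)) 0,
               PySem.Int.floordiv st.2 (ps.length : Int)))
            (1, (n : Int))).1) from by funext n; simp]
  rw [show List.map (List.length ∘ fun pe => altPowList pe.1 pe.2) fac
      = (List.map (fun pe => altPowList pe.1 pe.2) fac).map List.length from (List.map_map).symm]
  rw [alt_enum]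
  simp
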